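-- pv_equiv track=rewrite | github.com/blzzua/codewars | 6-kyu/pair_items_from_two_lists_of_different_lengths.py | pair_items
-- ===== SOURCE A (Python) =====
-- from itertools import combinations
--
-- def pair_items(list1, list2):
--     res = []
--     if len(list1) < len(list2):
--         for comb in combinations(list2, len(list1)):
--             res.append(list(zip(list1,comb)))
--     else:
--         for comb in combinations(list1, len(list2)):
--             res.append(list(zip(comb,list2)))
--     return res
-- ===== SOURCE B (Python) =====
-- def _fuse(short, long):
--     # lists of (short_elem, long_elem) pairs, one per k-subset of long, in ascending-index order
--     if not short:
--         return [[]]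
--     res = []
--     for i, x in enumerate(long):
--         for rest in _fuse(short[1:], long[i+1:]):
--             res.append([(short[0], x)] + rest)
--     return res
--
-- def pair_items(list1, list2):
--     if len(list1) < len(list2):
--         return _fuse(list1, list2)
--     return [[(l, s) for (s, l) in row] for row in _fuse(list2, list1)]
-- ===== Notes on version B (the rewrite author's own statement) =====
-- stated objective: alternative
-- what changed: Replaces itertools.combinations + zip with one recursive helper that enumerates k-subsets of the longer list and builds the zipped pair-lists directly during the recursion (no intermediate combination tuples, no separate zip pass).
import Mathlib
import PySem

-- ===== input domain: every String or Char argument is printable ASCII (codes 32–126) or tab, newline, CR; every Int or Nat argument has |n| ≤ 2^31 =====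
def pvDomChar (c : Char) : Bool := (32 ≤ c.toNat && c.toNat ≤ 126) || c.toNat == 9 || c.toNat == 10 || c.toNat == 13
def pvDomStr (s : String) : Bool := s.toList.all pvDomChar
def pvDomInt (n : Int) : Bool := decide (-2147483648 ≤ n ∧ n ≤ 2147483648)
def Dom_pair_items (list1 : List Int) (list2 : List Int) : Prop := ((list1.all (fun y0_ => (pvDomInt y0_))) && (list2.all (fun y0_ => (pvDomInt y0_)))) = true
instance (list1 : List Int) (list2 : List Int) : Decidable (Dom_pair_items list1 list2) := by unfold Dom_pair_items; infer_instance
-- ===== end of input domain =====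

-- ===== PORT A =====
-- itertools.combinations(xs, k): k-subsets in ascending-position (lexicographic) order,
-- ported by hand step for step (PySem has no combinations primitive); exact on all inputs.
def pyCombs : List Int → Nat → List (List Int)
  | _, 0 => [[]]
  | [], _ + 1 => []
  | x :: xs, k + 1 => (pyCombs xs k).map (fun c => x :: c) ++ pyCombs xs (k + 1)

def pair_items (list1 : List Int) (list2 : List Int) : List (List (Int × Int)) :=
  if list1.length < list2.length then
    (pyCombs list2 list1.length).foldl (fun res comb => res ++ [list1.zip comb]) []
  else
    (pyCombs list1 list2.length).foldl (fun res comb => res ++ [comb.zip list2]) []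

-- ===== PORT B =====
-- _fuse short long: one pair-list per k-subset of long (k = len short), built directly.
def fuse : List Int → List Int → List (List (Int × Int))
  | [], _ => [[]]
  | _ :: _, [] => []
  | s :: ss, x :: rest =>
      (fuse ss rest).map (fun r => (s, x) :: r) ++ fuse (s :: ss) rest
termination_by short long => (short.length, long.length)

def pair_items_alt (list1 : List Int) (list2 : List Int) : List (List (Int × Int)) :=
  if list1.length < list2.length then fuse list1 list2
  else (fuse list2 list1).map (fun row => row.map (fun p => (p.2, p.1)))

-- ===== PRECONDITION & SPEC =====
def Spec_pair_items (list1 : List Int) (list2 : List Int) (out : List (List (Int × Int))) : Prop := out = pair_items_alt list1 list2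
instance (list1 : List Int) (list2 : List Int) (out : List (List (Int × Int))) : Decidable (Spec_pair_items list1 list2 out) := by unfold Spec_pair_items; infer_instance

-- ===== CLAIM (what is proved, stated in full; the proofs are below) =====
def Claim_equal_pair_items : Prop := ∀ (list1 : List Int) (list2 : List Int), Dom_pair_items list1 list2 → Spec_pair_items list1 list2 (pair_items list1 list2)

-- ===== LEMMAS AND PROOFS =====

theorem foldl_append_map (g : List Int → List (Int × Int)) (l : List (List Int))
    (acc : List (List (Int × Int))) :
    l.foldl (fun res comb => res ++ [g comb]) acc = acc ++ l.map g := by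
  induction l generalizing acc with
  | nil => simp
  | cons c cs ih => simp [List.foldl, ih]

theorem zip_swap_eq (a b : List Int) :
    a.zip b = (b.zip a).map (fun p => (p.2, p.1)) := by
  induction a generalizing b with
  | nil => cases b <;> simp
  | cons x xs ih => cases b <;> simp [ih]

theorem fuse_eq_combs_zip (short long : List Int) :
    fuse short long = (pyCombs long short.length).map (fun c => short.zip c) := by
  induction short generalizing long with
  | nil => simp [fuse, pyCombs]
  | cons s ss ih =>
    induction long with
    | nil => simp [fuse, pyCombs]
    | cons x rest ihl =>
      simp only [fuse, ih, ihl, pyCombs, List.length_cons, List.map_append, List.map_map]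
      rfl

-- ===== VERDICT (by name: the statement is the Claim_ definition above) =====
theorem pair_items_spec : Claim_equal_pair_items := by
  intro list1 list2 _
  unfold Spec_pair_items pair_items pair_items_alt
  split
  · rw [foldl_append_map, fuse_eq_combs_zip]; simp
  · rw [foldl_append_map, fuse_eq_combs_zip]
    simp only [List.nil_append, List.map_map]
    apply List.map_congr_left
    intro c _
    simp [Function.comp, zip_swap_eq c list2]
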